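-- pv_equiv track=rewrite | github.com/Myunwoo/algorithm_study | heap/programmers42626.py | solution
-- ===== SOURCE A (Python) =====
-- from heapq import heappush,heappop,heapify
--
-- def solution(scoville, K):
--     heapify(scoville)
--     answer=0
--
--     while len(scoville)>1:
--         if scoville[0]>=K:
--             break
--         f1=heappop(scoville)
--         f2=heappop(scoville)
--         new=f1+f2*2
--         heappush(scoville,new)
--         answer+=1
--
--     if scoville[0]<K:
--         answer=-1
--     return answer
-- ===== SOURCE B (Python) =====
-- def solution(scoville, K):
--     # sorted working list + hand-rolled binary insertion instead of a heap
--     s = sorted(scoville)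
--     answer = 0
--     while len(s) > 1 and s[0] < K:
--         f1 = s[0]
--         f2 = s[1]
--         del s[:2]
--         new = f1 + 2 * f2
--         lo, hi = 0, len(s)
--         while lo < hi:
--             mid = (lo + hi) // 2
--             if s[mid] < new:
--                 lo = mid + 1
--             else:
--                 hi = mid
--         s.insert(lo, new)
--         answer += 1
--     if s[0] < K:
--         answer = -1
--     return answer
-- ===== Notes on version B (the rewrite author's own statement) =====
-- stated objective: alternative
-- what changed: Replaces the binary heap (heapify/heappop/heappush) by a once-sorted working list maintained with a hand-rolled binary-search insertion; each round pops the two front elements and insorts the mix back.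
import Mathlib
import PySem

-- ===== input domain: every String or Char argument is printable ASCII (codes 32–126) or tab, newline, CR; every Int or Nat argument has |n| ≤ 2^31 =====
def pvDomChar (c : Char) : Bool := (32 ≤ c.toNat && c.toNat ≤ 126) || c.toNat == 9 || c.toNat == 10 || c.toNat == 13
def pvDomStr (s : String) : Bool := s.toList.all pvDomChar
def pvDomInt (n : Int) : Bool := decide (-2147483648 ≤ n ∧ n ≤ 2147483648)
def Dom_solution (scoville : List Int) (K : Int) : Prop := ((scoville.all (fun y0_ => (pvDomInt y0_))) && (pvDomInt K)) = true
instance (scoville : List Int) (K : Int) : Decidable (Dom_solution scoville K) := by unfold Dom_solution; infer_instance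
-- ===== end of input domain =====

-- B replaces A's binary heap by a once-sorted list maintained with hand-rolled binary insertion
-- (same return value; both Pythons mutate state — A mutates the argument, B a local copy; the
-- equivalence proved here is about the return value only).

-- ===== PORT A =====
-- termination measures of the ports (cited by name in 'decreasing_by')
theorem pv_dec_parent (s p : Nat) (h : s < p) : (p - 1) / 2 < p := by omega
theorem pv_dec_child (p e c : Nat) (h1 : 2 * p + 1 < e) (hc : c = 2 * p + 1 ∨ c = 2 * p + 2) :
    e - c < e - p := by omega

-- literal port of heapq._siftdown (the final 'heap[pos] = newitem' write included)
def siftdownLoop (heap : List Int) (startpos pos : Nat) (newitem : Int) : List Int :=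
  if _h : startpos < pos then
    let parentpos := (pos - 1) / 2
    let parent := heap.getD parentpos 0
    if newitem < parent then
      siftdownLoop (heap.set pos parent) startpos parentpos newitem
    else heap.set pos newitem
  else heap.set pos newitem
termination_by pos
decreasing_by exact pv_dec_parent _ _ _h

-- literal port of heapq._siftup's child-descending loop plus its closing
-- 'heap[pos] = newitem; _siftdown(heap, startpos, pos)'
def siftupLoop (heap : List Int) (startpos pos endpos : Nat) (newitem : Int) : List Int :=
  if _h : 2 * pos + 1 < endpos then
    let childpos :=
      if 2 * pos + 2 < endpos ∧ ¬ (heap.getD (2 * pos + 1) 0 < heap.getD (2 * pos + 2) 0)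
      then 2 * pos + 2 else 2 * pos + 1
    siftupLoop (heap.set pos (heap.getD childpos 0)) startpos childpos endpos newitem
  else siftdownLoop (heap.set pos newitem) startpos pos newitem
termination_by endpos - pos
decreasing_by exact pv_dec_child _ _ _ _h (by split <;> simp)

-- heapq._siftup(heap, pos): newitem = heap[pos] (in range at every call site)
def siftup (heap : List Int) (pos : Nat) : List Int :=
  siftupLoop heap pos pos heap.length (heap.getD pos 0)

-- heapq.heapify: for i in reversed(range(n//2)): _siftup(x, i)
def heapify (x : List Int) : List Int :=
  ((List.range (x.length / 2)).reverse).foldl (fun h i => siftup h i) x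

-- heapq.heappop; 'heap.pop()' raises on [], which no admitted input reaches (Pre_ below)
def heappop (heap : List Int) : Int × List Int :=
  let lastelt := heap.getLast?.getD 0
  let rest := heap.dropLast
  if rest = [] then (lastelt, [])
  else (rest.getD 0 0, siftup (rest.set 0 lastelt) 0)

-- heapq.heappush: heap.append(item); _siftdown(heap, 0, len(heap)-1)
def heappush (heap : List Int) (item : Int) : List Int :=
  siftdownLoop (heap ++ [item]) 0 heap.length item

theorem pv_len_sdl_aux : ∀ (pos : Nat) (heap : List Int) (startpos : Nat) (x : Int),
    (siftdownLoop heap startpos pos x).length = heap.length := by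
  intro pos
  induction pos using Nat.strong_induction_on with
  | _ p IH =>
  intro heap s x
  rw [siftdownLoop]
  split
  · next h =>
    simp only []
    split
    · rw [IH ((p - 1) / 2) (pv_dec_parent s p h)]
      exact List.length_set ..
    · exact List.length_set ..
  · exact List.length_set ..

theorem pv_len_sdl (heap : List Int) (startpos pos : Nat) (x : Int) :
    (siftdownLoop heap startpos pos x).length = heap.length :=
  pv_len_sdl_aux pos heap startpos x

theorem pv_len_sul_aux : ∀ (n p : Nat) (heap : List Int) (s e : Nat) (x : Int), n = e - p →
    (siftupLoop heap s p e x).length = heap.length := by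
  intro n
  induction n using Nat.strong_induction_on with
  | _ n IH =>
  intro p heap s e x hn
  rw [siftupLoop]
  split
  · next h =>
    simp only []
    rw [IH (e - (if 2 * p + 2 < e ∧ ¬heap.getD (2 * p + 1) 0 < heap.getD (2 * p + 2) 0
        then 2 * p + 2 else 2 * p + 1))
      (by rw [hn]; exact pv_dec_child _ _ _ h (by split <;> simp)) _ _ _ _ _ rfl]
    exact List.length_set ..
  · rw [pv_len_sdl]
    exact List.length_set ..

theorem pv_len_sul (heap : List Int) (s p e : Nat) (x : Int) :
    (siftupLoop heap s p e x).length = heap.length :=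
  pv_len_sul_aux (e - p) p heap s e x rfl

theorem pv_len_siftup (heap : List Int) (pos : Nat) :
    (siftup heap pos).length = heap.length := by
  simp [siftup, pv_len_sul]

theorem pv_len_heappop (heap : List Int) :
    (heappop heap).2.length = heap.length - 1 := by
  have hd : heap.dropLast.length = heap.length - 1 := by simp
  unfold heappop
  by_cases h : heap.dropLast = []
  · have := congrArg List.length h
    simp only [h, List.length_nil] at this hd ⊢
    simp; omega
  · simp [h, pv_len_siftup, hd]

theorem pv_len_heappush (heap : List Int) (x : Int) :
    (heappush heap x).length = heap.length + 1 := by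
  simp [heappush, pv_len_sdl]

theorem pv_dec_loopA (heap : List Int) (x : Int) (h : 1 < heap.length) :
    (heappush (heappop (heappop heap).2).2 x).length < heap.length := by
  rw [pv_len_heappush, pv_len_heappop, pv_len_heappop]
  omega

-- the while-loop of A; returns (final heap, answer)
def loopA (heap : List Int) (K : Int) (answer : Int) : List Int × Int :=
  if _h : 1 < heap.length then
    if heap.getD 0 0 ≥ K then (heap, answer)
    else
      let p1 := heappop heap
      let p2 := heappop p1.2
      loopA (heappush p2.2 (p1.1 + p2.1 * 2)) K (answer + 1)
  else (heap, answer)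
termination_by heap.length
decreasing_by exact pv_dec_loopA _ _ _h

def solution (scoville : List Int) (K : Int) : Int :=
  let r := loopA (heapify scoville) K 0
  if r.1.getD 0 0 < K then -1 else r.2

-- ===== PORT B =====
-- Source B's hand-rolled binary search (bisect-left): while lo < hi: mid=(lo+hi)//2 …
theorem pv_dec_bis1 (lo hi : Nat) (h : lo < hi) : hi - ((lo + hi) / 2 + 1) < hi - lo := by
  omega
theorem pv_dec_bis2 (lo hi : Nat) (h : lo < hi) : (lo + hi) / 2 - lo < hi - lo := by
  omega

def bisLoop (s : List Int) (new : Int) (lo hi : Nat) : Nat :=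
  if _h : lo < hi then
    let mid := (lo + hi) / 2
    if s.getD mid 0 < new then bisLoop s new (mid + 1) hi else bisLoop s new lo mid
  else lo
termination_by hi - lo
decreasing_by
  · exact pv_dec_bis1 _ _ _h
  · exact pv_dec_bis2 _ _ _h

theorem pv_dec_loopB (s : List Int) (new : Int) (h : 1 < s.length) :
    ((s.drop 2).insertIdx (bisLoop (s.drop 2) new 0 (s.drop 2).length) new).length < s.length := by
  have hb := List.length_insertIdx_le_succ (l := s.drop 2)
    (i := bisLoop (s.drop 2) new 0 (s.drop 2).length) (x := new)
  have : (s.drop 2).length = s.length - 2 := by simp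
  omega

-- the while-loop of B: pop the two front elements of the sorted list, insort the mix back
def loopB (s : List Int) (K : Int) (answer : Int) : List Int × Int :=
  if _h : 1 < s.length ∧ s.getD 0 0 < K then
    let f1 := s.getD 0 0
    let f2 := s.getD 1 0
    let t := s.drop 2          -- del s[:2]
    let new := f1 + 2 * f2
    let lo := bisLoop t new 0 t.length
    loopB (t.insertIdx lo new) K (answer + 1)
  else (s, answer)
termination_by s.length
decreasing_by exact pv_dec_loopB _ _ _h.1

def solution_alt (scoville : List Int) (K : Int) : Int :=
  let s := PySem.List.sorted scoville (fun x => x) false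
  let r := loopB s K 0
  if r.1.getD 0 0 < K then -1 else r.2

-- ===== PRECONDITION & SPEC =====
-- Pre_ excludes only the empty list, on which Python A raises IndexError at the final scoville[0]
def Pre_solution (scoville : List Int) (K : Int) : Prop := scoville ≠ []
instance (scoville : List Int) (K : Int) : Decidable (Pre_solution scoville K) := by
  unfold Pre_solution; infer_instance
def pvWitness_solution : List Int × Int := ([1, 2, 3, 9, 10, 12], 7)

def Spec_solution (scoville : List Int) (K : Int) (out : Int) : Prop := out = solution_alt scoville K
instance (scoville : List Int) (K : Int) (out : Int) : Decidable (Spec_solution scoville K out) := by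
  unfold Spec_solution; infer_instance

-- ===== CLAIM (what is proved, stated in full; the proofs are below) =====
def Claim_equal_solution : Prop := ∀ (scoville : List Int) (K : Int), Dom_solution scoville K → Pre_solution scoville K → Spec_solution scoville K (solution scoville K)

-- ===== LEMMAS AND PROOFS =====

-- 'j is in the subtree rooted at s' (following parent links)
def inSub (s p : Nat) : Bool :=
  if _h : p ≤ s then p == s else inSub s ((p - 1) / 2)
termination_by p
decreasing_by omega

theorem inSub_self (s : Nat) : inSub s s = true := by
  unfold inSub; simp

theorem inSub_le {s p : Nat} (h : inSub s p = true) : s ≤ p := by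
  unfold inSub at h
  split at h
  · simp at h; omega
  · omega

theorem inSub_parent {s p : Nat} (h : inSub s p = true) (hne : p ≠ s) :
    inSub s ((p - 1) / 2) = true := by
  have := inSub_le h
  unfold inSub at h
  split at h
  · simp at h; omega
  · exact h

theorem inSub_child {s i j : Nat} (h : inSub s i = true)
    (hj : j = 2 * i + 1 ∨ j = 2 * i + 2) : inSub s j = true := by
  have hle := inSub_le h
  have hpar : (j - 1) / 2 = i := by omega
  unfold inSub
  split
  · omega
  · rw [hpar]; exact h

theorem not_inSub_child {s i j : Nat} (h : inSub s i = false) (hjs : j ≠ s)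
    (hj : j = 2 * i + 1 ∨ j = 2 * i + 2) : inSub s j = false := by
  have hpar : (j - 1) / 2 = i := by omega
  unfold inSub
  split
  · simp [hjs]
  · rw [hpar]; exact h

-- getD-on-set helpers
theorem gd_set_self {l : List Int} {i : Nat} (h : i < l.length) (v : Int) :
    (l.set i v).getD i 0 = v := by
  simp [List.getD, List.getElem?_set_self h]

theorem gd_set_ne {l : List Int} {i j : Nat} (h : i ≠ j) (v : Int) :
    (l.set i v).getD j 0 = l.getD j 0 := by
  simp [List.getD, List.getElem?_set_ne h]

-- multiset view of 'set'
theorem set_perm (l : List Int) (i : Nat) (v : Int) (h : i < l.length) :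
    (l.set i v).Perm (v :: l.eraseIdx i) := by
  induction l generalizing i with
  | nil => simp at h
  | cons a t ih =>
    cases i with
    | zero => simp
    | succ k =>
      simp only [List.set_cons_succ, List.eraseIdx_cons_succ]
      have hk : k < t.length := by simpa using h
      exact ((ih k hk).cons a).trans (List.Perm.swap v a _)

theorem perm_cons_eraseIdx (l : List Int) (k : Nat) (hk : k < l.length) :
    l.Perm (l.getD k 0 :: l.eraseIdx k) := by
  have := set_perm l k (l.getD k 0) hk
  rwa [List.getD_eq_getElem l 0 hk, List.set_getElem_self hk,
    ← List.getD_eq_getElem l 0 hk] at this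

theorem perm_set_swap (l : List Int) (a b : Nat) (x : Int)
    (ha : a < l.length) (hb : b < l.length) (hne : a ≠ b) :
    ((l.set a (l.getD b 0)).set b x).Perm (l.set a x) := by
  induction l generalizing a b with
  | nil => simp at ha
  | cons y t ih =>
    match a, b with
    | 0, 0 => exact absurd rfl hne
    | 0, k + 1 =>
      have hk : k < t.length := by simpa using hb
      simp only [List.getD_cons_succ, List.set_cons_zero, List.set_cons_succ]
      have h1 := (set_perm t k x hk).cons (t.getD k 0)
      have h2 := ((perm_cons_eraseIdx t k hk).symm).cons x
      exact (h1.trans (List.Perm.swap x (t.getD k 0) _)).trans h2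
    | k + 1, 0 =>
      have hk : k < t.length := by simpa using ha
      simp only [List.getD_cons_zero, List.set_cons_zero, List.set_cons_succ]
      have h1 := (set_perm t k y hk).cons x
      have h2 := ((set_perm t k x hk).symm).cons y
      exact (h1.trans (List.Perm.swap y x _)).trans h2
    | i + 1, j + 1 =>
      have hi : i < t.length := by simpa using ha
      have hj : j < t.length := by simpa using hb
      simp only [List.getD_cons_succ, List.set_cons_succ]
      exact (ih i j hi hj (by omega)).cons y


theorem inSub_zero (p : Nat) : inSub 0 p = true := by
  induction p using Nat.strong_induction_on with
  | _ p IH =>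
    unfold inSub
    split
    · simp; omega
    · exact IH _ (by omega)

-- subtree-rooted heap property
def HFull (h : List Int) (s : Nat) : Prop :=
  ∀ i j, inSub s i = true → (j = 2 * i + 1 ∨ j = 2 * i + 2) → j < h.length →
    h.getD i 0 ≤ h.getD j 0

-- index-threshold heap property (heapify's loop invariant)
def HInv (h : List Int) (k : Nat) : Prop :=
  ∀ a b, k ≤ a → (b = 2 * a + 1 ∨ b = 2 * a + 2) → b < h.length →
    h.getD a 0 ≤ h.getD b 0

theorem Inv_iff_HFull (h : List Int) : HInv h 0 ↔ HFull h 0 := by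
  constructor
  · intro hi i j _ hk hl; exact hi i j (Nat.zero_le _) hk hl
  · intro hf a b _ hk hl; exact hf a b (inSub_zero a) hk hl

-- correctness of the percolate-up loop (heapq._siftdown)
theorem sdl_spec (p : Nat) (h : List Int) (s : Nat) (x : Int)
    (hin : inSub s p = true) (hp : p < h.length)
    (Q1 : ∀ i j, inSub s i = true → i ≠ p → (j = 2 * i + 1 ∨ j = 2 * i + 2) →
      j < h.length → j ≠ p → h.getD i 0 ≤ h.getD j 0)
    (Q2 : ∀ j, (j = 2 * p + 1 ∨ j = 2 * p + 2) → j < h.length → x ≤ h.getD j 0)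
    (Q3 : s < p → ∀ j, (j = 2 * p + 1 ∨ j = 2 * p + 2) → j < h.length →
      h.getD ((p - 1) / 2) 0 ≤ h.getD j 0) :
    (siftdownLoop h s p x).Perm (h.set p x) ∧
    (∀ j, inSub s j = false → (siftdownLoop h s p x).getD j 0 = h.getD j 0) ∧
    HFull (siftdownLoop h s p x) s := by
  induction p using Nat.strong_induction_on generalizing h with
  | _ p IH =>
  have hsp := inSub_le hin
  rw [siftdownLoop]
  split
  · next hlt =>
    -- s < p
    set pp := (p - 1) / 2 with hppdef
    have hpplt : pp < p := by omega
    have hppln : pp < h.length := by omega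
    have hkpp : p = 2 * pp + 1 ∨ p = 2 * pp + 2 := by omega
    have hinpp : inSub s pp = true := inSub_parent hin (by omega)
    by_cases hcmp : x < h.getD pp 0
    · simp only [if_pos hcmp]
      set h' := h.set p (h.getD pp 0) with hh'def
      have hlen' : h'.length = h.length := by simp [hh'def]
      have gd'p : h'.getD p 0 = h.getD pp 0 := gd_set_self hp _
      have gd'ne : ∀ j, j ≠ p → h'.getD j 0 = h.getD j 0 := by
        intro j hj; exact gd_set_ne (by omega) _
      have hQ1' : ∀ i j, inSub s i = true → i ≠ pp → (j = 2 * i + 1 ∨ j = 2 * i + 2) →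
          j < h'.length → j ≠ pp → h'.getD i 0 ≤ h'.getD j 0 := by
        intro i j hiin hipp hkid hjl hjpp
        rw [hlen'] at hjl
        by_cases hip : i = p
        · subst hip
          rw [gd'p, gd'ne j (by omega)]
          exact Q3 hlt j hkid hjl
        · rw [gd'ne i hip]
          by_cases hjp : j = p
          · exfalso; subst hjp; exact hipp (by omega)
          · rw [gd'ne j hjp]
            exact Q1 i j hiin hip hkid hjl hjp
      have hQ2' : ∀ j, (j = 2 * pp + 1 ∨ j = 2 * pp + 2) → j < h'.length →
          x ≤ h'.getD j 0 := by
        intro j hkid hjl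
        rw [hlen'] at hjl
        by_cases hjp : j = p
        · subst hjp; rw [gd'p]; omega
        · rw [gd'ne j hjp]
          have := Q1 pp j hinpp (by omega) hkid hjl hjp
          omega
      have hQ3' : s < pp → ∀ j, (j = 2 * pp + 1 ∨ j = 2 * pp + 2) → j < h'.length →
          h'.getD ((pp - 1) / 2) 0 ≤ h'.getD j 0 := by
        intro hspp j hkid hjl
        rw [hlen'] at hjl
        set ppp := (pp - 1) / 2 with hpppdef
        have hpppl : ppp < pp := by omega
        have hinppp : inSub s ppp = true := inSub_parent hinpp (by omega)
        have hkpp2 : pp = 2 * ppp + 1 ∨ pp = 2 * ppp + 2 := by omega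
        have e1 : h'.getD ppp 0 = h.getD ppp 0 := gd'ne ppp (by omega)
        have step1 : h.getD ppp 0 ≤ h.getD pp 0 :=
          Q1 ppp pp hinppp (by omega) hkpp2 hppln (by omega)
        by_cases hjp : j = p
        · subst hjp; rw [e1, gd'p]; exact step1
        · rw [e1, gd'ne j hjp]
          have step2 : h.getD pp 0 ≤ h.getD j 0 :=
            Q1 pp j hinpp (by omega) hkid hjl hjp
          omega
      obtain ⟨ihP, ihU, ihH⟩ := IH pp hpplt h' hinpp (by omega) hQ1' hQ2' hQ3'
      refine ⟨?_, ?_, ihH⟩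
      · exact ihP.trans (perm_set_swap h p pp x hp hppln (by omega))
      · intro j hj
        rw [ihU j hj, gd'ne j]
        intro hjp; rw [hjp, hin] at hj; simp at hj
    · -- terminal: parent ≤ x
      simp only [if_neg hcmp]
      refine ⟨List.Perm.refl _, ?_, ?_⟩
      · intro j hj
        apply gd_set_ne
        intro hjp; rw [← hjp, hin] at hj; simp at hj
      · intro i j hiin hkid hjl
        simp only [List.length_set] at hjl
        by_cases hip : i = p
        · rw [hip] at hkid ⊢
          rw [gd_set_self hp, gd_set_ne (show p ≠ j by omega)]
          exact Q2 j hkid hjl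
        · rw [gd_set_ne (show p ≠ i from fun he => hip he.symm)]
          by_cases hjp : j = p
          · rw [hjp] at hkid ⊢
            have hi2 : i = pp := by omega
            rw [gd_set_self hp, hi2]
            omega
          · rw [gd_set_ne (show p ≠ j from fun he => hjp he.symm)]
            exact Q1 i j hiin hip hkid hjl hjp
  · next hge =>
    -- p = s
    have hps : p = s := by omega
    refine ⟨List.Perm.refl _, ?_, ?_⟩
    · intro j hj
      apply gd_set_ne
      intro hjp; rw [← hjp, hin] at hj; simp at hj
    · intro i j hiin hkid hjl
      simp only [List.length_set] at hjl
      by_cases hip : i = p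
      · rw [hip] at hkid ⊢
        rw [gd_set_self hp, gd_set_ne (show p ≠ j by omega)]
        exact Q2 j hkid hjl
      · rw [gd_set_ne (show p ≠ i from fun he => hip he.symm)]
        by_cases hjp : j = p
        · exfalso
          have := inSub_le hiin
          omega
        · rw [gd_set_ne (show p ≠ j from fun he => hjp he.symm)]
          exact Q1 i j hiin hip hkid hjl hjp

-- correctness of the child-descending phase (heapq._siftup)
theorem sul_spec (n : Nat) : ∀ (p : Nat) (h : List Int) (s : Nat) (x : Int),
    n = h.length - p → inSub s p = true → p < h.length →
    (∀ i j, inSub s i = true → i ≠ p → (j = 2 * i + 1 ∨ j = 2 * i + 2) →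
      j < h.length → h.getD i 0 ≤ h.getD j 0) →
    (s < p → ∀ j, (j = 2 * p + 1 ∨ j = 2 * p + 2) → j < h.length →
      h.getD ((p - 1) / 2) 0 ≤ h.getD j 0) →
    (siftupLoop h s p h.length x).Perm (h.set p x) ∧
    (∀ j, inSub s j = false → (siftupLoop h s p h.length x).getD j 0 = h.getD j 0) ∧
    HFull (siftupLoop h s p h.length x) s := by
  induction n using Nat.strong_induction_on with
  | _ n IH =>
  intro p h s x hn hin hp P1 P2
  have hsp := inSub_le hin
  rw [siftupLoop]
  split
  · next hlt =>
    -- a child exists: descend to the smaller child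
    set c := if 2 * p + 2 < h.length ∧ ¬ (h.getD (2 * p + 1) 0 < h.getD (2 * p + 2) 0)
      then 2 * p + 2 else 2 * p + 1 with hcdef
    have hckid : c = 2 * p + 1 ∨ c = 2 * p + 2 := by
      rw [hcdef]; split <;> simp
    have hcl : c < h.length := by
      rw [hcdef]; split
      · omega
      · exact hlt
    have hcp : p < c := by omega
    have hinc : inSub s c = true := inSub_child hin hckid
    have hmin : ∀ j, (j = 2 * p + 1 ∨ j = 2 * p + 2) → j < h.length →
        h.getD c 0 ≤ h.getD j 0 := by
      intro j hkid hjl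
      rw [hcdef]
      split
      · next hcond =>
        rcases hkid with hj1 | hj2
        · subst hj1; omega
        · subst hj2; exact le_refl _
      · next hcond =>
        rcases hkid with hj1 | hj2
        · subst hj1; exact le_refl _
        · subst hj2
          rcases Decidable.not_and_iff_not_or_not.mp hcond with hc1 | hc2
          · omega
          · have := Decidable.not_not.mp hc2; omega
    set h' := h.set p (h.getD c 0) with hh'def
    have hlen' : h'.length = h.length := by simp [hh'def]
    have gd'p : h'.getD p 0 = h.getD c 0 := gd_set_self hp _
    have gd'ne : ∀ j, j ≠ p → h'.getD j 0 = h.getD j 0 := by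
      intro j hj; exact gd_set_ne (by omega) _
    have hP1' : ∀ i j, inSub s i = true → i ≠ c → (j = 2 * i + 1 ∨ j = 2 * i + 2) →
        j < h.length → h'.getD i 0 ≤ h'.getD j 0 := by
      intro i j hiin hic hkid hjl
      by_cases hip : i = p
      · rw [hip] at hkid ⊢
        rw [gd'p, gd'ne j (by omega)]
        exact hmin j hkid hjl
      · rw [gd'ne i hip]
        by_cases hjp : j = p
        · -- i is p's parent
          rw [hjp] at hkid ⊢
          have hpls : s < p := by
            rcases Nat.lt_or_ge s p with hl | hg
            · exact hl
            · exfalso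
              have : p = s := by omega
              have := inSub_le hiin
              omega
          have hi2 : i = (p - 1) / 2 := by omega
          rw [gd'p, hi2]
          exact P2 hpls c hckid hcl
        · rw [gd'ne j hjp]
          exact P1 i j hiin hip hkid hjl
    have hP2' : s < c → ∀ j, (j = 2 * c + 1 ∨ j = 2 * c + 2) → j < h.length →
        h'.getD ((c - 1) / 2) 0 ≤ h'.getD j 0 := by
      intro _ j hkid hjl
      have hcpar : (c - 1) / 2 = p := by omega
      rw [hcpar, gd'p, gd'ne j (by omega)]
      exact P1 c j hinc (by omega) hkid hjl
    have hrec := IH (h.length - c) (by omega) c h' s x (by rw [hlen']) hinc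
      (by omega) (by rw [hlen']; exact hP1') (by rw [hlen']; exact fun _ => hP2' (by omega))
    rw [hlen'] at hrec
    obtain ⟨ihP, ihU, ihH⟩ := hrec
    refine ⟨?_, ?_, ihH⟩
    · exact ihP.trans (perm_set_swap h p c x hp hcl (by omega))
    · intro j hj
      rw [ihU j hj, gd'ne j]
      intro hjp; rw [hjp, hin] at hj; simp at hj
  · next hge =>
    -- no child: place newitem here and percolate up
    have hsdl := sdl_spec p (h.set p x) s x hin (by simpa using hp)
      (by
        intro i j hiin hip hkid hjl hjp
        simp only [List.length_set] at hjl
        rw [gd_set_ne (show p ≠ i from fun he => hip he.symm),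
          gd_set_ne (show p ≠ j from fun he => hjp he.symm)]
        exact P1 i j hiin hip hkid hjl)
      (by intro j hkid hjl; simp only [List.length_set] at hjl; omega)
      (by intro _ j hkid hjl; simp only [List.length_set] at hjl; omega)
    obtain ⟨sP, sU, sH⟩ := hsdl
    refine ⟨?_, ?_, ?_⟩
    · rw [List.set_set] at sP
      exact sP
    · intro j hj
      rw [sU j hj]
      apply gd_set_ne
      intro hjp; rw [← hjp, hin] at hj; simp at hj
    · intro i j hiin hkid hjl
      have hl2 : j < (h.set p x).length := by
        rw [pv_len_sdl] at hjl
        simpa using hjl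
      exact sH i j hiin hkid (by rwa [pv_len_sdl])

theorem siftup_spec (h : List Int) (pos : Nat) (hp : pos < h.length)
    (P1 : ∀ i j, inSub pos i = true → i ≠ pos → (j = 2 * i + 1 ∨ j = 2 * i + 2) →
      j < h.length → h.getD i 0 ≤ h.getD j 0) :
    (siftup h pos).Perm h ∧
    (∀ j, inSub pos j = false → (siftup h pos).getD j 0 = h.getD j 0) ∧
    HFull (siftup h pos) pos := by
  have := sul_spec (h.length - pos) pos h pos (h.getD pos 0) rfl (inSub_self pos) hp P1
    (by omega)
  have hset : h.set pos (h.getD pos 0) = h := by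
    rw [List.getD_eq_getElem h 0 hp, List.set_getElem_self hp]
  unfold siftup
  rcases this with ⟨a, b, c⟩
  exact ⟨by rwa [hset] at a, b, c⟩

theorem heapify_aux (k : Nat) : ∀ (h : List Int), 2 * k ≤ h.length → HInv h k →
    (((List.range k).reverse).foldl (fun acc i => siftup acc i) h).Perm h ∧
    (((List.range k).reverse).foldl (fun acc i => siftup acc i) h).length = h.length ∧
    HInv (((List.range k).reverse).foldl (fun acc i => siftup acc i) h) 0 := by
  induction k with
  | zero =>
    intro h _ hiv
    simp only [List.range_zero, List.reverse_nil, List.foldl_nil]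
    exact ⟨List.Perm.refl h, by simp, hiv⟩
  | succ k ih =>
    intro h hk hiv
    rw [List.range_succ, List.reverse_append, List.reverse_singleton, List.singleton_append,
      List.foldl_cons]
    have hkl : k < h.length := by omega
    obtain ⟨sP, sU, sH⟩ := siftup_spec h k hkl (by
      intro i j hiin hik hkid hjl
      have := inSub_le hiin
      exact hiv i j (by omega) hkid hjl)
    have hlen : (siftup h k).length = h.length := pv_len_siftup h k
    have hiv' : HInv (siftup h k) k := by
      intro a b ha hkid hbl
      rw [hlen] at hbl
      by_cases hain : inSub k a = true
      · exact sH a b hain hkid (by rwa [hlen])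
      · have hane : a ≠ k := by
          intro he; rw [he, inSub_self] at hain; simp at hain
        have hbk : b ≠ k := by omega
        have hbin : inSub k b = false :=
          not_inSub_child (Bool.not_eq_true _ ▸ hain) hbk hkid
        rw [sU a (Bool.not_eq_true _ ▸ hain), sU b hbin]
        exact hiv a b (by omega) hkid hbl
    obtain ⟨fP, fL, fH⟩ := ih (siftup h k) (by omega) hiv'
    exact ⟨fP.trans sP, by rw [fL, hlen], fH⟩

theorem heapify_spec (x : List Int) :
    (heapify x).Perm x ∧ (heapify x).length = x.length ∧ HInv (heapify x) 0 := by
  have hiv : HInv x (x.length / 2) := by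
    intro a b ha hb hl; omega
  exact heapify_aux (x.length / 2) x (by omega) hiv

theorem heap_min (h : List Int) (hh : HInv h 0) :
    ∀ j, j < h.length → h.getD 0 0 ≤ h.getD j 0 := by
  intro j
  induction j using Nat.strong_induction_on with
  | _ j IH =>
    intro hj
    rcases Nat.eq_zero_or_pos j with hj0 | hj0
    · subst hj0; exact le_refl _
    · have hpar : j = 2 * ((j - 1) / 2) + 1 ∨ j = 2 * ((j - 1) / 2) + 2 := by omega
      have h1 := IH ((j - 1) / 2) (by omega) (by omega)
      have h2 := hh ((j - 1) / 2) j (Nat.zero_le _) hpar hj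
      exact h1.trans h2

theorem head_eq (h s : List Int) (hh : HInv h 0) (hperm : h.Perm s)
    (hs : s.Pairwise (· ≤ ·)) : h.getD 0 0 = s.getD 0 0 := by
  cases s with
  | nil =>
    have : h = [] := List.eq_nil_of_length_eq_zero (by simpa using hperm.length_eq)
    simp [this]
  | cons m t =>
    have hhne : h ≠ [] := by
      intro he; subst he; exact absurd hperm.length_eq (by simp)
    have hmem : m ∈ h := hperm.mem_iff.mpr (List.mem_cons_self)
    obtain ⟨i, hi, hgi⟩ := List.getElem_of_mem hmem
    have h1 : h.getD 0 0 ≤ m := by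
      have := heap_min h hh i hi
      rwa [List.getD_eq_getElem h 0 hi, hgi] at this
    have h0 : 0 < h.length := List.length_pos_iff.mpr hhne
    have hmem0 : h.getD 0 0 ∈ h := by
      rw [List.getD_eq_getElem h 0 h0]; exact List.getElem_mem h0
    have hmem0s : h.getD 0 0 ∈ m :: t := hperm.mem_iff.mp hmem0
    have h2 : m ≤ h.getD 0 0 := by
      rcases List.mem_cons.mp hmem0s with he | ht
      · omega
      · exact List.rel_of_pairwise_cons hs ht
    have : h.getD 0 0 = m := le_antisymm h1 h2
    simpa using this

theorem gd_dropLast (h : List Int) (i : Nat) (hi : i < h.length - 1) :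
    h.dropLast.getD i 0 = h.getD i 0 := by
  have h1 : i < h.dropLast.length := by simp; omega
  have h2 : i < h.length := by omega
  rw [List.getD_eq_getElem _ 0 h1, List.getD_eq_getElem _ 0 h2, List.getElem_dropLast]

theorem heappop_spec (h : List Int) (hh : HInv h 0) (hne : h ≠ []) :
    (heappop h).1 = h.getD 0 0 ∧ HInv (heappop h).2 0 ∧
    h.Perm ((heappop h).1 :: (heappop h).2) := by
  cases h with
  | nil => exact absurd rfl hne
  | cons a t =>
  by_cases ht : t = []
  · subst ht
    have hone : heappop [a] = (a, []) := by simp [heappop]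
    refine ⟨by rw [hone]; rfl, ?_, ?_⟩
    · intro x y _ hk hl
      rw [hone] at hl
      simp at hl
    · rw [hone]
  · have hdne : (a :: t).dropLast ≠ [] := by
      cases t with
      | nil => exact absurd rfl ht
      | cons b u => simp
    have htl : 1 ≤ t.length := by
      cases t with
      | nil => exact absurd rfl ht
      | cons b u => simp
    have hlast : (a :: t).getLast?.getD 0 = t.getLast ht := by
      rw [List.getLast?_eq_getLast (by simp : (a :: t) ≠ []), List.getLast_cons ht]
      rfl
    have hdl : (a :: t).dropLast = a :: t.dropLast := by
      cases t with
      | nil => exact absurd rfl ht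
      | cons b u => simp
    have hg : ((a :: t).dropLast.set 0 ((a :: t).getLast?.getD 0)) =
        t.getLast ht :: t.dropLast := by
      rw [hdl, hlast, List.set_cons_zero]
    have hglen : (t.getLast ht :: t.dropLast).length = t.length := by simp; omega
    obtain ⟨sP, _, sH⟩ := siftup_spec (t.getLast ht :: t.dropLast) 0 (by simp) (by
      intro i j hiin hik hkid hjl
      rw [hglen] at hjl
      -- positions 1 ≤ i < j < t.length of (last :: dropLast t) are positions of a :: t
      have hi1 : 1 ≤ i := by
        rcases Nat.eq_zero_or_pos i with h0 | h1
        · exact absurd h0 hik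
        · exact h1
      have hj1 : 1 ≤ j := by omega
      have e1 : (t.getLast ht :: t.dropLast).getD i 0 = (a :: t).getD i 0 := by
        obtain ⟨i', rfl⟩ : ∃ i', i = i' + 1 := ⟨i - 1, by omega⟩
        rw [List.getD_cons_succ, List.getD_cons_succ, gd_dropLast t i' (by omega)]
      have e2 : (t.getLast ht :: t.dropLast).getD j 0 = (a :: t).getD j 0 := by
        obtain ⟨j', rfl⟩ : ∃ j', j = j' + 1 := ⟨j - 1, by omega⟩
        rw [List.getD_cons_succ, List.getD_cons_succ, gd_dropLast t j' (by omega)]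
      rw [e1, e2]
      exact hh i j (Nat.zero_le _) hkid (by simp; omega))
    have hpop : heappop (a :: t) =
        ((a :: t).getD 0 0, siftup (t.getLast ht :: t.dropLast) 0) := by
      unfold heappop
      rw [if_neg hdne, hg]
      have : (a :: t).dropLast.getD 0 0 = (a :: t).getD 0 0 := by
        rw [hdl]; rfl
      rw [this]
    refine ⟨by rw [hpop], ?_, ?_⟩
    · rw [hpop]
      rw [Inv_iff_HFull]
      exact sH
    · rw [hpop]
      have h1 : (t.dropLast ++ [t.getLast ht]).Perm (t.getLast ht :: t.dropLast) :=
        List.perm_append_singleton _ _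
      rw [List.dropLast_append_getLast ht] at h1
      have h2 : (t.getLast ht :: t.dropLast).Perm (siftup (t.getLast ht :: t.dropLast) 0) :=
        sP.symm
      have : (a :: t).getD 0 0 = a := rfl
      rw [this]
      exact (h1.trans h2).cons a

theorem heappush_spec (h : List Int) (x : Int) (hh : HInv h 0) :
    HInv (heappush h x) 0 ∧ (heappush h x).Perm (x :: h) := by
  have hlen : (h ++ [x]).length = h.length + 1 := by simp
  have hgapp : ∀ i, i < h.length → (h ++ [x]).getD i 0 = h.getD i 0 := by
    intro i hi
    rw [List.getD_eq_getElem _ 0 (by simp; omega), List.getD_eq_getElem _ 0 hi,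
      List.getElem_append_left hi]
  obtain ⟨sP, _, sH⟩ := sdl_spec h.length (h ++ [x]) 0 x (inSub_zero _) (by simp)
    (by
      intro i j hiin hip hkid hjl hjp
      rw [hlen] at hjl
      have hjlt : j < h.length := by omega
      have hilt : i < h.length := by omega
      rw [hgapp i hilt, hgapp j hjlt]
      exact hh i j (Nat.zero_le _) hkid hjlt)
    (by intro j hkid hjl; rw [hlen] at hjl; omega)
    (by intro h0 _ _ _; exact absurd h0 (by omega))
  constructor
  · rw [Inv_iff_HFull]
    exact sH
  · have hset : (h ++ [x]).set h.length x = h ++ [x] := by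
      have hxl : h.length < (h ++ [x]).length := by simp
      have : (h ++ [x])[h.length] = x := by
        rw [List.getElem_append_right (le_refl _)]
        simp
      conv_rhs => rw [← List.set_getElem_self hxl, this]
    rw [hset] at sP
    exact sP.trans (List.perm_append_singleton x h)

-- B-side lemmas
theorem sorted_getD_mono (t : List Int) (hs : t.Pairwise (· ≤ ·)) (i j : Nat)
    (hij : i ≤ j) (hj : j < t.length) : t.getD i 0 ≤ t.getD j 0 := by
  rcases Nat.lt_or_ge i j with hlt | hge
  · rw [List.getD_eq_getElem t 0 (by omega), List.getD_eq_getElem t 0 hj]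
    exact List.pairwise_iff_getElem.mp hs i j (by omega) hj hlt
  · have : i = j := by omega
    subst this; exact le_refl _

theorem bis_spec (t : List Int) (x : Int) (hs : t.Pairwise (· ≤ ·)) :
    ∀ (n lo hi : Nat), n = hi - lo → lo ≤ hi → hi ≤ t.length →
    (∀ i, i < lo → t.getD i 0 < x) →
    (∀ i, hi ≤ i → i < t.length → ¬ t.getD i 0 < x) →
    (∀ i, i < bisLoop t x lo hi → t.getD i 0 < x) ∧
    (∀ i, bisLoop t x lo hi ≤ i → i < t.length → x ≤ t.getD i 0) ∧
    bisLoop t x lo hi ≤ t.length := by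
  intro n
  induction n using Nat.strong_induction_on with
  | _ n IH =>
  intro lo hi hn hlh hht hleft hright
  rw [bisLoop]
  split
  · next hlt =>
    have hmid : (lo + hi) / 2 < hi := by omega
    have hmidl : lo ≤ (lo + hi) / 2 := by omega
    simp only []
    split
    · next hcm =>
      apply IH (hi - ((lo + hi) / 2 + 1)) (by omega) _ _ rfl (by omega) hht
      · intro i hi2
        exact lt_of_le_of_lt (sorted_getD_mono t hs i ((lo + hi) / 2) (by omega) (by omega)) hcm
      · exact hright
    · next hcm =>
      apply IH ((lo + hi) / 2 - lo) (by omega) _ _ rfl (by omega) (by omega)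
      · exact hleft
      · intro i hi2 hil
        have := sorted_getD_mono t hs ((lo + hi) / 2) i hi2 hil
        omega
  · next hge =>
    have : lo = hi := by omega
    exact ⟨hleft, fun i h1 h2 => by
      have := hright i (by omega) h2
      omega, by omega⟩

theorem insertIdx_eq (l : List Int) (r : Nat) (x : Int) (hr : r ≤ l.length) :
    l.insertIdx r x = l.take r ++ x :: l.drop r := by
  induction l generalizing r with
  | nil => simp at hr; simp [hr]
  | cons a t ih =>
    cases r with
    | zero => simp
    | succ k => simp [List.insertIdx_succ_cons, ih k (by simpa using hr)]

theorem insort_spec (t : List Int) (x : Int) (hs : t.Pairwise (· ≤ ·)) :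
    (t.insertIdx (bisLoop t x 0 t.length) x).Pairwise (· ≤ ·) ∧
    (t.insertIdx (bisLoop t x 0 t.length) x).Perm (x :: t) := by
  obtain ⟨hl, hr, hle⟩ := bis_spec t x hs (t.length - 0) 0 t.length rfl (Nat.zero_le _)
    le_rfl (by omega) (fun i h1 h2 => by omega)
  set r := bisLoop t x 0 t.length with hrdef
  constructor
  · rw [insertIdx_eq t r x hle]
    rw [List.pairwise_append]
    refine ⟨hs.sublist (List.take_sublist _ _), ?_, ?_⟩
    · rw [List.pairwise_cons]
      refine ⟨?_, hs.sublist (List.drop_sublist _ _)⟩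
      intro y hy
      obtain ⟨i, hi, hgi⟩ := List.getElem_of_mem hy
      have hlen : i + r < t.length := by
        simp at hi
        omega
      rw [List.getElem_drop] at hgi
      have := hr (r + i) (by omega) (by omega)
      rw [List.getD_eq_getElem t 0 (by omega)] at this
      omega
    · intro a ha b hb
      obtain ⟨i, hi, hgi⟩ := List.getElem_of_mem ha
      have hitake : i < r := by
        simp at hi
        omega
      have hil : i < t.length := by
        have := hle; omega
      rw [List.getElem_take] at hgi
      have hax : a < x := by
        have := hl i hitake
        rw [List.getD_eq_getElem t 0 hil] at this
        omega
      rcases List.mem_cons.mp hb with rfl | hbd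
      · omega
      · obtain ⟨j, hj, hgj⟩ := List.getElem_of_mem hbd
        have hjlen : j + r < t.length := by
          simp at hj
          omega
        rw [List.getElem_drop] at hgj
        have := hr (r + j) (by omega) (by omega)
        rw [List.getD_eq_getElem t 0 (by omega)] at this
        omega
  · exact List.perm_insertIdx x t hle

-- the two loops agree (answers equal; final lists related by the loop invariant)
theorem loops_eq : ∀ (n : Nat) (hp s : List Int) (K ans : Int), hp.length = n →
    HInv hp 0 → hp.Perm s → s.Pairwise (· ≤ ·) →
    (loopA hp K ans).2 = (loopB s K ans).2 ∧ HInv (loopA hp K ans).1 0 ∧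
    (loopA hp K ans).1.Perm (loopB s K ans).1 ∧ (loopB s K ans).1.Pairwise (· ≤ ·) := by
  intro n
  induction n using Nat.strong_induction_on with
  | _ n IH =>
  intro hp s K ans hlen hh hperm hs
  have hsl : hp.length = s.length := hperm.length_eq
  by_cases h1 : 1 < hp.length
  · have hd := head_eq hp s hh hperm hs
    by_cases h2 : hp.getD 0 0 ≥ K
    · rw [loopA, loopB, dif_pos h1, if_pos h2,
        dif_neg (by rw [← hd]; intro hc; omega)]
      exact ⟨rfl, hh, hperm, hs⟩
    · -- both sides iterate
      have hpne : hp ≠ [] := by intro he; rw [he] at h1; simp at h1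
      obtain ⟨e1, hI1, hP1⟩ := heappop_spec hp hh hpne
      have hlen1 : (heappop hp).2.length = hp.length - 1 := pv_len_heappop hp
      have h1ne : (heappop hp).2 ≠ [] := by
        intro he
        rw [he] at hlen1
        simp at hlen1
        omega
      obtain ⟨e2, hI2, hP2⟩ := heappop_spec (heappop hp).2 hI1 h1ne
      have hlen2 : (heappop (heappop hp).2).2.length = hp.length - 2 := by
        rw [pv_len_heappop, hlen1]; omega
      -- destructure s
      obtain ⟨a, b, t, rfl⟩ : ∃ a b t, s = a :: b :: t := by
        cases s with
        | nil => simp only [List.length_nil] at hsl; omega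
        | cons a s' =>
          cases s' with
          | nil => simp only [List.length_cons, List.length_nil] at hsl; omega
          | cons b t => exact ⟨a, b, t, rfl⟩
      have hf1 : (heappop hp).1 = a := by rw [e1, hd]; rfl
      have hq1 : (heappop hp).2.Perm (b :: t) := by
        have := (hP1.symm.trans hperm)
        rw [hf1] at this
        exact this.cons_inv
      have hs' : (b :: t).Pairwise (· ≤ ·) := (List.pairwise_cons.mp hs).2
      have hd2 : (heappop hp).2.getD 0 0 = b :=
        head_eq (heappop hp).2 (b :: t) hI1 hq1 hs' 
      have hf2 : (heappop (heappop hp).2).1 = b := by rw [e2, hd2]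
      have hq2 : (heappop (heappop hp).2).2.Perm t := by
        have := (hP2.symm.trans hq1)
        rw [hf2] at this
        exact this.cons_inv
      have ht : t.Pairwise (· ≤ ·) := (List.pairwise_cons.mp hs').2
      set new := (heappop hp).1 + (heappop (heappop hp).2).1 * 2 with hnewdef
      have hnewB : new = a + 2 * b := by rw [hnewdef, hf1, hf2]; ring
      obtain ⟨hIp, hPp⟩ := heappush_spec (heappop (heappop hp).2).2 new hI2
      obtain ⟨hsort, hpermB⟩ := insort_spec t (a + 2 * b) ht
      have hpnext : (heappush (heappop (heappop hp).2).2 new).Perm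
          (t.insertIdx (bisLoop t (a + 2 * b) 0 t.length) (a + 2 * b)) := by
        have hx : (new :: (heappop (heappop hp).2).2).Perm ((a + 2 * b) :: t) := by
          rw [hnewB]
          exact hq2.cons _
        exact hPp.trans (hx.trans hpermB.symm)
      have hlenp : (heappush (heappop (heappop hp).2).2 new).length = hp.length - 1 := by
        rw [pv_len_heappush, hlen2]; omega
      have hrec := IH (hp.length - 1) (by omega) _ _ K (ans + 1) hlenp hIp hpnext hsort
      rw [loopA, loopB, dif_pos h1, if_neg h2,
        dif_pos (⟨by simp, by rw [← hd]; omega⟩ :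
          1 < (a :: b :: t).length ∧ (a :: b :: t).getD 0 0 < K)]
      simp only [List.getD_cons_zero, List.getD_cons_succ, List.drop_succ_cons, List.drop_zero]
      exact hrec
  · rw [loopA, loopB, dif_neg h1, dif_neg (by rw [← hsl]; intro hc; omega)]
    exact ⟨rfl, hh, hperm, hs⟩

-- ===== VERDICT (by name: the statement is the Claim_ definition above) =====
theorem solution_spec : Claim_equal_solution := by
  intro scoville K _ _
  unfold Spec_solution solution solution_alt
  obtain ⟨hHP, _, hHI⟩ := heapify_spec scoville
  have hsp : (PySem.List.sorted scoville (fun x => x) false).Perm scoville :=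
    PySem.List.sorted_perm scoville (fun x => x) false
  have hss : (PySem.List.sorted scoville (fun x => x) false).Pairwise (· ≤ ·) := by
    have := PySem.List.sorted_pairwise scoville (fun x => x)
    simpa using this
  have hperm := hHP.trans hsp.symm
  obtain ⟨hans, hI, hP, hS⟩ := loops_eq (heapify scoville).length (heapify scoville)
    (PySem.List.sorted scoville (fun x => x) false) K 0 rfl hHI hperm hss
  have hfin := head_eq _ _ hI hP hS
  simp only []
  rw [hfin, hans]
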